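-- pv_equiv track=rewrite | github.com/AAbasinejad/Biological-Interactions-Analysis | Network_Analysis.py | louvain_eval
-- ===== SOURCE A (Python) =====
-- def louvain_eval(partition, SG):
--
--     # communities list is a list of lists that represents the uniprots blongs to each partition
--     communities_list = [[] for x in range(max(partition.values()))]
--     for i in range(max(partition.values())):
--         for n,p in partition.items():
--             if (p == i):
--                 communities_list[i].append(n)
--     SG_of_partitions = [[] for x in range(len(communities_list))]
--     for i in range(len(communities_list)):
--         for j in range(len(communities_list[i])):
--             if (communities_list[i][j] in SG):
--                 SG_of_partitions[i].append(communities_list[i][j])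
--
--     number_of_seed_genes_in_each_partition = [len(l) for l in SG_of_partitions]
--
--     partitions_length = [len(l) for l in communities_list]
--
--     return len(communities_list), SG_of_partitions, number_of_seed_genes_in_each_partition, partitions_length
-- ===== SOURCE B (Python) =====
-- def louvain_eval(partition, SG):
--     # One pass buckets nodes by community value; then a single loop over the
--     # community indices accumulates all four outputs at once (no intermediate
--     # communities_list, no separate length passes); seed genes via a set.
--     groups = {}
--     for n, p in partition.items():
--         groups.setdefault(p, []).append(n)
--     sgset = set(SG)
--     count = 0
--     sg, seed_counts, sizes = [], [], []
--     for i in range(max(partition.values())):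
--         c = groups.get(i, [])
--         hits = [n for n in c if n in sgset]
--         count += 1
--         sg.append(hits)
--         seed_counts.append(len(hits))
--         sizes.append(len(c))
--     return count, sg, seed_counts, sizes
-- ===== Notes on version B (the rewrite author's own statement) =====
-- stated objective: faster
-- what changed: Replaces A's per-community rescans of the whole dict and its three separate output-building passes with one bucketing pass into a dict keyed by community value followed by a single loop that accumulates all four outputs at once, using a set for the seed-gene membership test.
import Mathlib
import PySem

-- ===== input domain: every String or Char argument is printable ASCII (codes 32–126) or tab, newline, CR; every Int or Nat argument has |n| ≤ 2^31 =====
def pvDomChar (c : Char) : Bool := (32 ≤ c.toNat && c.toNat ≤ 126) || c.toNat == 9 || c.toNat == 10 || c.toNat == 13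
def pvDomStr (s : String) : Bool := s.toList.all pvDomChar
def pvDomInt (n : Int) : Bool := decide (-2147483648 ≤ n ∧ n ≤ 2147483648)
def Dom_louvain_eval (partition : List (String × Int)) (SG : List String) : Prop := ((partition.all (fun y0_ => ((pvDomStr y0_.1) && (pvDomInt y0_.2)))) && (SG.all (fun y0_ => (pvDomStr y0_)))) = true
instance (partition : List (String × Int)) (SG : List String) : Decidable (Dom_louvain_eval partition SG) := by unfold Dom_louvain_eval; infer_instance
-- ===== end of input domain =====

-- B replaces A's per-community rescans and three output passes with one bucketing pass plus one accumulating loop (asymptotically faster).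

-- ===== PORT A =====
-- A: communities_list = [[] for _ in range(max(partition.values()))];
--    for i in range(max): for n,p in items: if p == i: communities_list[i].append(n)
--    then per-community scan appending the members that are in SG, then the two length lists.
def louvain_eval (partition : List (String × Int)) (SG : List String) : Int × List (List String) × List Int × List Int :=
  let d := PySem.Dict.ofList partition
  match PySem.List.max? d.values (fun v => v) with
  | none => (0, [], [], [])   -- max() on an empty dict raises ValueError; excluded by Pre_
  | some m =>
    let communities0 : List (List String) := (PySem.List.pyRange 0 m 1).map (fun _ => [])
    let communities := (PySem.List.pyRange 0 m 1).foldl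
      (fun cl i => d.items.foldl
        (fun cl2 np => if np.2 == i then cl2.modify i.toNat (fun c => c ++ [np.1]) else cl2) cl)
      communities0
    let sg := communities.map (fun c =>
      c.foldl (fun acc x => if SG.contains x then acc ++ [x] else acc) [])
    ((communities.length : Int), sg, sg.map (fun l => (l.length : Int)),
      communities.map (fun l => (l.length : Int)))

-- ===== PORT B =====
-- B: one pass over the dict grouping names by community value
--    (groups.setdefault(p, []).append(n) ≡ groups[p] = groups.get(p, []) + [n] = Dict.modify p [] (· ++ [n])),
--    then ONE loop over range(m) whose 4-tuple state accumulates count, seed-gene lists,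
--    seed counts and community sizes together; seed genes via set membership.
def louvain_eval_alt (partition : List (String × Int)) (SG : List String) : Int × List (List String) × List Int × List Int :=
  let d := PySem.Dict.ofList partition
  let groups := d.items.foldl (fun g np => g.modify np.2 [] (fun c => c ++ [np.1])) PySem.Dict.empty
  let sgset := PySem.Set.ofList SG
  match PySem.List.max? d.values (fun v => v) with
  | none => (0, [], [], [])   -- max() on an empty dict raises ValueError; excluded by Pre_
  | some m =>
    (PySem.List.pyRange 0 m 1).foldl
      (fun s i =>
        let c := groups.getD i []
        let hits := c.filter (fun n => sgset.contains n)
        (s.1 + 1, s.2.1 ++ [hits], s.2.2.1 ++ [(hits.length : Int)], s.2.2.2 ++ [(c.length : Int)]))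
      (0, [], [], [])

-- ===== PRECONDITION & SPEC =====
-- Pre_ excludes only the empty dict, on which Python's max(partition.values()) raises ValueError.
def Pre_louvain_eval (partition : List (String × Int)) (SG : List String) : Prop := partition ≠ []
instance (partition : List (String × Int)) (SG : List String) : Decidable (Pre_louvain_eval partition SG) := by unfold Pre_louvain_eval; infer_instance
def pvWitness_louvain_eval : (List (String × Int)) × List String := ([("a", 2), ("b", 0), ("c", 0)], ["b", "z"])

def Spec_louvain_eval (partition : List (String × Int)) (SG : List String) (out : Int × List (List String) × List Int × List Int) : Prop := out = louvain_eval_alt partition SG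
instance (partition : List (String × Int)) (SG : List String) (out : Int × List (List String) × List Int × List Int) : Decidable (Spec_louvain_eval partition SG out) := by unfold Spec_louvain_eval; infer_instance

-- ===== CLAIM (what is proved, stated in full; the proofs are below) =====
def Claim_equal_louvain_eval : Prop := ∀ (partition : List (String × Int)) (SG : List String), Dom_louvain_eval partition SG → Pre_louvain_eval partition SG → Spec_louvain_eval partition SG (louvain_eval partition SG)

-- ===== LEMMAS AND PROOFS =====

-- modify with the identity is the identity
theorem modify_id {α : Type} (l : List α) (k : Nat) :
    l.modify k (fun x => x) = l := by
  apply List.ext_getElem?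
  intro j
  simp [List.getElem?_modify]

-- two modifications at the same index compose
theorem modify_modify_self {α : Type} (l : List α) (k : Nat) (f g : α → α) :
    (l.modify k f).modify k g = l.modify k (fun x => g (f x)) := by
  apply List.ext_getElem?
  intro j
  simp [List.getElem?_modify]
  cases l[j]?
  · simp
  · simp only [Option.map_some]
    split <;> simp

-- A's inner loop over the dict items, at a fixed community index i
theorem inner_loop_eq (items : List (String × Int)) (i : Int) (cl : List (List String)) :
    items.foldl (fun cl2 np => if np.2 == i then cl2.modify i.toNat (fun c => c ++ [np.1]) else cl2) cl
      = cl.modify i.toNat (fun c => c ++ (items.filter (fun np => np.2 == i)).map Prod.fst) := by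
  induction items generalizing cl with
  | nil =>
    simpa using (modify_id cl i.toNat).symm
  | cons np t ih =>
    rw [List.foldl_cons]
    by_cases h : np.2 = i
    · rw [if_pos (by simp [h]), ih, modify_modify_self]
      simp [h]
    · rw [if_neg (by simp [h]), ih]
      simp [h]

-- A's outer loop: distinct nonnegative indices, each bucket touched once
theorem outer_loop_getElem (is : List Int) (cl : List (List String)) (j : Nat)
    (hpos : ∀ i ∈ is, 0 ≤ i) (hnd : is.Nodup)
    (F : Int → List String) :
    (is.foldl (fun cl i => cl.modify i.toNat (fun c => c ++ F i)) cl)[j]?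
      = if (j : Int) ∈ is then cl[j]?.map (fun c => c ++ F j) else cl[j]? := by
  induction is generalizing cl with
  | nil => simp
  | cons i t ih =>
    have hi : 0 ≤ i := hpos i (by simp)
    have hndt : t.Nodup := hnd.of_cons
    by_cases hj : (j : Int) = i
    · have hjt : (j : Int) ∉ t := by
        subst hj; exact (List.nodup_cons.mp hnd).1
      have hiN : i.toNat = j := by omega
      simp only [List.foldl_cons, ih _ (fun x hx => hpos x (by simp [hx])) hndt, hj,
        List.getElem?_modify, hiN]
      simp
      intro hit
      exact absurd hit (hj ▸ hjt)
    · have hiN : i.toNat ≠ j := by omega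
      simp only [List.foldl_cons, ih _ (fun x hx => hpos x (by simp [hx])) hndt]
      have : (cl.modify i.toNat (fun c => c ++ F i))[j]? = cl[j]? := by
        simp [hiN]
      simp [this, hj]

-- B's grouping dict returns exactly the names carrying value i, in order
theorem groups_getD (items : List (String × Int)) (i : Int) :
    (items.foldl (fun g np => g.modify np.2 [] (fun c => c ++ [np.1]))
        (PySem.Dict.empty : PySem.Dict Int (List String))).getD i []
      = (items.filter (fun np => np.2 == i)).map Prod.fst := by
  have h := PySem.Dict.getD_foldl_modify_append
      (items.map (fun np => (np.2, np.1))) (PySem.Dict.empty : PySem.Dict Int (List String)) i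
  rw [List.foldl_map] at h
  simpa [List.filter_map, List.map_map, Function.comp] using h

-- the community list A builds coincides with reading B's grouping dict along the range
theorem communities_eq (items : List (String × Int)) (m : Int)
    (groups : PySem.Dict Int (List String))
    (hg : ∀ i, groups.getD i [] = (items.filter (fun np => np.2 == i)).map Prod.fst) :
    (PySem.List.pyRange 0 m 1).foldl
      (fun cl i => items.foldl
        (fun cl2 np => if np.2 == i then cl2.modify i.toNat (fun c => c ++ [np.1]) else cl2) cl)
      ((PySem.List.pyRange 0 m 1).map (fun _ => []))
    = (PySem.List.pyRange 0 m 1).map (fun i => groups.getD i []) := by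
  have hF : ∀ (cl : List (List String)),
      (PySem.List.pyRange 0 m 1).foldl
        (fun cl i => items.foldl
          (fun cl2 np => if np.2 == i then cl2.modify i.toNat (fun c => c ++ [np.1]) else cl2) cl) cl
      = (PySem.List.pyRange 0 m 1).foldl
        (fun cl i => cl.modify i.toNat (fun c => c ++ (items.filter (fun np => np.2 == i)).map Prod.fst)) cl := by
    intro cl
    apply PySem.List.foldl_congr_mem
    intro a x _
    exact inner_loop_eq items x a
  rw [hF]
  apply List.ext_getElem?
  intro j
  rw [outer_loop_getElem _ _ _ (fun i hi => (PySem.List.mem_pyRange_one.mp hi).1)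
      (PySem.List.nodup_pyRange_one 0 m) _]
  simp only [List.getElem?_map, hg]
  by_cases hj : j < (PySem.List.pyRange 0 m 1).length
  · have hmem : (j : Int) ∈ PySem.List.pyRange 0 m 1 := by
      rw [PySem.List.mem_pyRange_one]
      rw [PySem.List.length_pyRange_one] at hj
      omega
    have hget : (PySem.List.pyRange 0 m 1)[j]? = some ((0 : Int) + j) := by
      rw [List.getElem?_eq_getElem hj, PySem.List.getElem_pyRange_one]
    simp [hmem, hget]
  · have hlt : ¬ ((j : Int) < m) := by
      rw [PySem.List.length_pyRange_one] at hj
      omega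
    have hmem : (j : Int) ∉ PySem.List.pyRange 0 m 1 := by
      rw [PySem.List.mem_pyRange_one]
      omega
    simp [hmem, hlt]

-- B's one-pass 4-tuple accumulator, in closed form
theorem foldl_acc4 (is : List Int) (F : Int → List String) (G H : Int → Int)
    (k : Int) (a : List (List String)) (b c : List Int) :
    is.foldl (fun s i => (s.1 + 1, s.2.1 ++ [F i], s.2.2.1 ++ [G i], s.2.2.2 ++ [H i])) (k, a, b, c)
      = (k + is.length, a ++ is.map F, b ++ is.map G, c ++ is.map H) := by
  induction is generalizing k a b c with
  | nil => simp
  | cons i t ih =>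
    rw [List.foldl_cons, ih]
    simp only [Prod.mk.injEq, List.map_cons, List.length_cons]
    refine ⟨by push_cast; ring, by simp, by simp, by simp⟩

-- ===== VERDICT (by name: the statement is the Claim_ definition above) =====
theorem louvain_eval_spec : Claim_equal_louvain_eval := by
  intro partition SG _ _
  simp only [Spec_louvain_eval, louvain_eval, louvain_eval_alt]
  cases hmax : PySem.List.max? (PySem.Dict.ofList partition).values (fun v => v) with
  | none => rfl
  | some m =>
    dsimp only
    have hcomm := communities_eq (PySem.Dict.ofList partition).items m _
      (fun i => groups_getD (PySem.Dict.ofList partition).items i)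
    have hsg : ∀ c : List String,
        c.foldl (fun acc x => if SG.contains x then acc ++ [x] else acc) []
        = c.filter (fun n => (PySem.Set.ofList SG).contains n) := by
      intro c
      rw [PySem.List.foldl_append_if (fun x => SG.contains x) (fun x => x) c []]
      simp
    rw [foldl_acc4]
    simp only [hcomm, hsg, List.map_map, List.length_map, Function.comp_def,
      PySem.List.length_pyRange_one, List.nil_append, zero_add]
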